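-- pv_equiv track=rewrite | github.com/togal7/BOTrader | OLD_UNUSED/timeframe_validator.py | get_supported_timeframes_message
-- ===== SOURCE A (Python) =====
-- SUPPORTED_TIMEFRAMES = {
--     'mexc': ['1m', '5m', '15m', '30m', '1h', '4h', '1d', '1w', '1M'],
--     'binance': ['1m', '3m', '5m', '15m', '30m', '1h', '4h', '12h', '1d', '3d', '1w', '1M'],
--     'bybit': ['1m', '3m', '5m', '15m', '30m', '1h', '4h', '1d', '1w', '1M']
-- }
--
-- def get_supported_timeframes_message(exchange):
--     """
--     Zwraca ładny message z obsługiwanymi timeframes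
--
--     Args:
--         exchange: Nazwa giełdy
--
--     Returns:
--         str: Sformatowana wiadomość
--     """
--     exchange = exchange.lower()
--
--     if exchange not in SUPPORTED_TIMEFRAMES:
--         return "Obsługiwane interwały: standardowe"
--
--     supported = SUPPORTED_TIMEFRAMES[exchange]
--
--     # Grupuj
--     minutes = [tf for tf in supported if 'm' in tf and len(tf) <= 3]
--     hours = [tf for tf in supported if 'h' in tf]
--     days = [tf for tf in supported if 'd' in tf]
--     weeks = [tf for tf in supported if 'w' in tf]
--     months = [tf for tf in supported if 'M' in tf]
--
--     parts = []
--     if minutes: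
--         parts.append(f"Minuty: {', '.join(minutes)}")
--     if hours:
--         parts.append(f"Godziny: {', '.join(hours)}")
--     if days:
--         parts.append(f"Dni: {', '.join(days)}")
--     if weeks:
--         parts.append(f"Tygodnie: {', '.join(weeks)}")
--     if months:
--         parts.append(f"Miesiące: {', '.join(months)}")
--
--     return "\n".join(parts)
-- ===== SOURCE B (Python) =====
-- SUPPORTED_TIMEFRAMES = {
--     'mexc': ['1m', '5m', '15m', '30m', '1h', '4h', '1d', '1w', '1M'],
--     'binance': ['1m', '3m', '5m', '15m', '30m', '1h', '4h', '12h', '1d', '3d', '1w', '1M'],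
--     'bybit': ['1m', '3m', '5m', '15m', '30m', '1h', '4h', '1d', '1w', '1M']
-- }
--
--
-- def get_supported_timeframes_message(exchange):
--     supported = SUPPORTED_TIMEFRAMES.get(exchange.lower())
--     if supported is None:
--         return "Obsługiwane interwały: standardowe"
--
--     # one pass: drop each timeframe into exactly one labeled bucket
--     buckets = [("Minuty", []), ("Godziny", []), ("Dni", []),
--                ("Tygodnie", []), ("Miesiące", [])]
--     for tf in supported:
--         if 'm' in tf and len(tf) <= 3:
--             buckets[0][1].append(tf)
--         elif 'h' in tf:
--             buckets[1][1].append(tf)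
--         elif 'd' in tf:
--             buckets[2][1].append(tf)
--         elif 'w' in tf:
--             buckets[3][1].append(tf)
--         elif 'M' in tf:
--             buckets[4][1].append(tf)
--
--     return "\n".join(f"{label}: {', '.join(tfs)}"
--                      for label, tfs in buckets if tfs)
-- ===== Notes on version B (the rewrite author's own statement) =====
-- stated objective: alternative
-- what changed: Replaced A's five separate filtering comprehensions over the supported list (plus the if-chain on the resulting lists) by a single bucketing pass that appends each timeframe to exactly one of five ordered labeled buckets via an if/elif chain, then one loop over the buckets building the labeled parts; the membership guard becomes a dict .get().
import Mathlib
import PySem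

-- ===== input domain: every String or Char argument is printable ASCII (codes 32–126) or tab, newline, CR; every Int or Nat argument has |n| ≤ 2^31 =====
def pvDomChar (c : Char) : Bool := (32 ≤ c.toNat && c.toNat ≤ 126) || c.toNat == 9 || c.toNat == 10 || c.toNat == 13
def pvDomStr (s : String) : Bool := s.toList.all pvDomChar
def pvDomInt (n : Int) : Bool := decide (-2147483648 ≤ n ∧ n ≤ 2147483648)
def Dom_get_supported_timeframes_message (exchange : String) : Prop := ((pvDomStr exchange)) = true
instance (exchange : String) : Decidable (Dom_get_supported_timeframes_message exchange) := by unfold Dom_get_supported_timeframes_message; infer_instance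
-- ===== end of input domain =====

-- B replaces A's five filtering passes and if-chain by a single bucketing pass over the
-- supported list followed by one loop over the labeled buckets (objective: alternative decomposition).

-- shared module constant SUPPORTED_TIMEFRAMES
def pvSTF : PySem.Dict String (List String) := PySem.Dict.mk
  [ ("mexc", ["1m", "5m", "15m", "30m", "1h", "4h", "1d", "1w", "1M"]),
    ("binance", ["1m", "3m", "5m", "15m", "30m", "1h", "4h", "12h", "1d", "3d", "1w", "1M"]),
    ("bybit", ["1m", "3m", "5m", "15m", "30m", "1h", "4h", "1d", "1w", "1M"]) ]

-- ===== PORT A =====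
def get_supported_timeframes_message (exchange : String) : String :=
  let ex := PySem.Str.lower exchange
  if pvSTF.contains ex = false then
    "Obsługiwane interwały: standardowe"
  else
    let supported := (pvSTF.get? ex).getD []
    let minutes := supported.filter fun tf => PySem.Str.isIn "m" tf && decide (PySem.Str.len tf ≤ 3)
    let hours := supported.filter fun tf => PySem.Str.isIn "h" tf
    let days := supported.filter fun tf => PySem.Str.isIn "d" tf
    let weeks := supported.filter fun tf => PySem.Str.isIn "w" tf
    let months := supported.filter fun tf => PySem.Str.isIn "M" tf
    let parts : List String := []
    let parts := if !minutes.isEmpty then parts ++ ["Minuty: " ++ PySem.Str.join ", " minutes] else parts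
    let parts := if !hours.isEmpty then parts ++ ["Godziny: " ++ PySem.Str.join ", " hours] else parts
    let parts := if !days.isEmpty then parts ++ ["Dni: " ++ PySem.Str.join ", " days] else parts
    let parts := if !weeks.isEmpty then parts ++ ["Tygodnie: " ++ PySem.Str.join ", " weeks] else parts
    let parts := if !months.isEmpty then parts ++ ["Miesiące: " ++ PySem.Str.join ", " months] else parts
    PySem.Str.join "\n" parts

-- ===== PORT B =====
-- state of B's single pass: the five buckets (minutes, hours, days, weeks, months)
def pvBuckets : Type := List String × List String × List String × List String × List String

def get_supported_timeframes_message_alt (exchange : String) : String :=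
  match pvSTF.get? (PySem.Str.lower exchange) with
  | none => "Obsługiwane interwały: standardowe"
  | some supported =>
    let b : pvBuckets :=
      supported.foldl (fun (b : pvBuckets) tf =>
        if PySem.Str.isIn "m" tf && decide (PySem.Str.len tf ≤ 3) then
          (b.1 ++ [tf], b.2.1, b.2.2.1, b.2.2.2.1, b.2.2.2.2)
        else if PySem.Str.isIn "h" tf then
          (b.1, b.2.1 ++ [tf], b.2.2.1, b.2.2.2.1, b.2.2.2.2)
        else if PySem.Str.isIn "d" tf then
          (b.1, b.2.1, b.2.2.1 ++ [tf], b.2.2.2.1, b.2.2.2.2)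
        else if PySem.Str.isIn "w" tf then
          (b.1, b.2.1, b.2.2.1, b.2.2.2.1 ++ [tf], b.2.2.2.2)
        else if PySem.Str.isIn "M" tf then
          (b.1, b.2.1, b.2.2.1, b.2.2.2.1, b.2.2.2.2 ++ [tf])
        else b)
        ([], [], [], [], [])
    let labeled : List (String × List String) :=
      [("Minuty", b.1), ("Godziny", b.2.1), ("Dni", b.2.2.1),
       ("Tygodnie", b.2.2.2.1), ("Miesiące", b.2.2.2.2)]
    PySem.Str.join "\n"
      ((labeled.filter fun p => !p.2.isEmpty).map fun p => p.1 ++ ": " ++ PySem.Str.join ", " p.2)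

-- ===== PRECONDITION & SPEC =====
def Spec_get_supported_timeframes_message (exchange : String) (out : String) : Prop := out = get_supported_timeframes_message_alt exchange
instance (exchange : String) (out : String) : Decidable (Spec_get_supported_timeframes_message exchange out) := by unfold Spec_get_supported_timeframes_message; infer_instance

-- ===== CLAIM (what is proved, stated in full; the proofs are below) =====
def Claim_equal_get_supported_timeframes_message : Prop := ∀ (exchange : String), Dom_get_supported_timeframes_message exchange → Spec_get_supported_timeframes_message exchange (get_supported_timeframes_message exchange)

-- ===== LEMMAS AND PROOFS =====

-- the lookup into the three-key constant dict, characterised without running either port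
theorem pvSTF_get?_of_ne (e : String) (h1 : e ≠ "mexc") (h2 : e ≠ "binance")
    (h3 : e ≠ "bybit") : pvSTF.get? e = none := by
  simp [pvSTF, PySem.Dict.get?, Ne.symm h1, Ne.symm h2, Ne.symm h3]

theorem pvSTF_contains_of_ne (e : String) (h1 : e ≠ "mexc") (h2 : e ≠ "binance")
    (h3 : e ≠ "bybit") : pvSTF.contains e = false := by
  rw [PySem.Dict.contains_eq_isSome_get?, pvSTF_get?_of_ne e h1 h2 h3]
  rfl

-- ===== VERDICT (by name: the statement is the Claim_ definition above) =====
theorem get_supported_timeframes_message_spec : Claim_equal_get_supported_timeframes_message := by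
  intro exchange _
  unfold Spec_get_supported_timeframes_message
  unfold get_supported_timeframes_message get_supported_timeframes_message_alt
  by_cases h1 : PySem.Str.lower exchange = "mexc"
  · rw [h1]; decide
  by_cases h2 : PySem.Str.lower exchange = "binance"
  · rw [h2]; decide
  by_cases h3 : PySem.Str.lower exchange = "bybit"
  · rw [h3]; decide
  simp only [pvSTF_get?_of_ne _ h1 h2 h3, pvSTF_contains_of_ne _ h1 h2 h3]
  rfl
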